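-- pv_equiv track=rewrite | github.com/AndanteKim/LeetCode_Practice | 2275-largest-combination-with-bitwise-and-greater-than-zero/2275-largest-combination-with-bitwise-and-greater-than-zero.py | largestCombination
-- ===== SOURCE A (Python) =====
-- from typing import List
--
-- def largestCombination(candidates: List[int]) -> int:
--     # Variable to track the maximum count of set bits.
--     max_count = 0
--
--     for i in range(24):
--         count = 0   # Count of numbers with the i-th bit set.
--         for num in candidates:
--             if num & (1 << i):  # Check if the i-th bit is set.
--                 count += 1
--         max_count = max(max_count, count)   # Update the maximum count.
--
--     return max_count
-- ===== SOURCE B (Python) =====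
-- from typing import List
--
-- def largestCombination(candidates: List[int]) -> int:
--     # Counter keyed by the value of each set bit, filled by Kernighan's
--     # lowest-set-bit extraction; only the 24 bits A inspects are kept.
--     counter = {}
--     for num in candidates:
--         m = num & 0xFFFFFF          # the 24 bits the task (and A) looks at
--         while m:
--             rest = m & (m - 1)      # m with its lowest set bit cleared
--             low = m ^ rest          # the lowest set bit itself
--             counter[low] = counter.get(low, 0) + 1
--             m = rest
--     return max(counter.values(), default=0)
-- ===== Notes on version B (the rewrite author's own statement) =====
-- stated objective: alternative
-- what changed: B replaces A's 24 fixed-bit rescans with Kernighan's lowest-set-bit extraction into a dictionary counter keyed by bit value (visiting only the set bits of each masked number) and returns the max of the counter's values; same asymptotic cost, different algorithm and data structure.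
import Mathlib
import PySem

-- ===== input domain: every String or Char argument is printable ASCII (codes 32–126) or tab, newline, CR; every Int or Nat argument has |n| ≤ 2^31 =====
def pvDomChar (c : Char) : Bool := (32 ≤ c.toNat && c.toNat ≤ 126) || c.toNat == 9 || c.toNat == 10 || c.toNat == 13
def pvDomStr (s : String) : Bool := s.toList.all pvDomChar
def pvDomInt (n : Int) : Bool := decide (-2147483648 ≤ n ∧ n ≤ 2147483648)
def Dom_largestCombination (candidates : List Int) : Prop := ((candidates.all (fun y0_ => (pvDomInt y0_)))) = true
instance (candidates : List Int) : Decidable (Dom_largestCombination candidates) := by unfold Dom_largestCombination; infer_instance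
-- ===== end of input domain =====

-- B counts via Kernighan's lowest-set-bit extraction into a dict keyed by bit value and takes the max of the counts, instead of A's 24 fixed-bit rescans (alternative algorithm/data structure, same cost).


-- ===== PORT A =====
def largestCombination (candidates : List Int) : Int :=
  (PySem.List.pyRange 0 24 1).foldl (fun max_count i =>
    max max_count
      (candidates.foldl (fun count num =>
        if PySem.Int.band num (1 <<< i.toNat) ≠ 0 then count + 1 else count) 0)) 0

-- ===== PORT B =====
-- the inner 'while m:' loop of Source B; at every call site m = num & 0xFFFFFF ≥ 0, so the
-- 'm ≤ 0' guard is exactly Python's 'while m:' exit there (it only makes the recursion total)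
def kernLoop (m : Int) (counter : PySem.Dict Int Int) : PySem.Dict Int Int :=
  if _h : m ≤ 0 then counter
  else
    let rest := PySem.Int.band m (m - 1)
    let low := PySem.Int.bxor m rest
    kernLoop rest (counter.insert low (counter.getD low 0 + 1))
termination_by m.toNat
decreasing_by
  rw [PySem.Int.band_of_nonneg (by omega) (by omega)]
  have h1 : (m - 1).toNat < m.toNat := by omega
  calc (((m.toNat &&& (m - 1).toNat : Nat) : Int)).toNat
      = m.toNat &&& (m - 1).toNat := Int.toNat_natCast _
    _ ≤ (m - 1).toNat := Nat.and_le_right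
    _ < m.toNat := h1

def largestCombination_alt (candidates : List Int) : Int :=
  let counter := candidates.foldl
    (fun counter num => kernLoop (PySem.Int.band num 16777215) counter) PySem.Dict.empty
  PySem.List.maxD counter.values (fun v => v) 0

-- ===== PRECONDITION & SPEC =====
def Spec_largestCombination (candidates : List Int) (out : Int) : Prop := out = largestCombination_alt candidates
instance (candidates : List Int) (out : Int) : Decidable (Spec_largestCombination candidates out) := by unfold Spec_largestCombination; infer_instance

-- ===== CLAIM (what is proved, stated in full; the proofs are below) =====
def Claim_equal_largestCombination : Prop := ∀ (candidates : List Int), Dom_largestCombination candidates → Spec_largestCombination candidates (largestCombination candidates)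

-- ===== LEMMAS AND PROOFS =====

-- ---- pure Nat bit facts ----

-- naturals with disjoint bits add like they or
theorem add_of_and_eq_zero : ∀ (a b : Nat), a &&& b = 0 → a + b = a ||| b := by
  intro a
  induction a using Nat.binaryRec with
  | zero => simp
  | bit ab m ih =>
    intro b h
    induction b using Nat.binaryRec with
    | zero => simp
    | bit bb n _ =>
      rw [Nat.land_bit, Nat.bit_eq_zero_iff] at h
      rw [Nat.lor_bit]
      have h2 := ih n h.1
      have h3 := h.2
      cases ab <;> cases bb <;> simp only [Nat.bit, Bool.and_self, Bool.and_false,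
        Bool.false_and, Bool.or_self, Bool.or_false, Bool.false_or, cond_true, cond_false] at h3 ⊢ <;>
        first | omega | simp at h3

-- y - (y &&& c) is bitwise "y and not c"
theorem testBit_sub_and (y c : Nat) (i : Nat) :
    (y - (y &&& c)).testBit i = (y.testBit i && !(c.testBit i)) := by
  have hd : (y &&& c) &&& Nat.ldiff y c = 0 := by
    apply Nat.eq_of_testBit_eq
    intro j
    simp only [Nat.testBit_and, Nat.testBit_ldiff, Nat.zero_testBit]
    cases y.testBit j <;> cases c.testBit j <;> rfl
  have ho : (y &&& c) ||| Nat.ldiff y c = y := by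
    apply Nat.eq_of_testBit_eq
    intro j
    simp only [Nat.testBit_or, Nat.testBit_and, Nat.testBit_ldiff]
    cases y.testBit j <;> cases c.testBit j <;> rfl
  have := add_of_and_eq_zero _ _ hd
  have hy : y - (y &&& c) = Nat.ldiff y c := by omega
  rw [hy, Nat.testBit_ldiff]

-- Kernighan's step: n ^^^ (n &&& (n-1)) is the lowest set bit of n,
-- and n &&& (n-1) is n with exactly that bit cleared
theorem lowbit_spec : ∀ (n : Nat), 0 < n →
    ∃ t, n ^^^ (n &&& (n - 1)) = 2 ^ t ∧ n.testBit t = true ∧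
      ∀ i, (n &&& (n - 1)).testBit i = (n.testBit i && decide (i ≠ t)) := by
  intro n
  induction n using Nat.binaryRec with
  | zero => omega
  | bit b m ih =>
    intro hpos
    cases b with
    | true =>
      have h1 : Nat.bit true m - 1 = Nat.bit false m := by simp [Nat.bit]
      refine ⟨0, ?_, by simp, ?_⟩
      · rw [h1, Nat.land_bit, Nat.xor_bit]
        simp [Nat.bit]
      · intro i
        rw [h1, Nat.land_bit]
        cases i with
        | zero => simp
        | succ j =>
          simp only [Nat.testBit_bit_succ]
          simp [Nat.and_self]
    | false =>
      have hm : 0 < m := by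
        rcases Nat.eq_zero_or_pos m with h | h
        · subst h; simp [Nat.bit] at hpos
        · exact h
      have h1 : Nat.bit false m - 1 = Nat.bit true (m - 1) := by simp [Nat.bit]; omega
      obtain ⟨t, hl, hb, hr⟩ := ih hm
      have hbit : (2 * m).testBit (t + 1) = true := by
        have h2 : 2 * m / 2 = m := by omega
        rw [Nat.testBit_add_one, h2]; exact hb
      refine ⟨t + 1, ?_, by simpa [Nat.bit] using hbit, ?_⟩
      · rw [h1, Nat.land_bit, Nat.xor_bit, hl]
        simp [Nat.bit]
        ring
      · intro i
        rw [h1, Nat.land_bit]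
        cases i with
        | zero => simp
        | succ j =>
          simp only [Nat.testBit_bit_succ, Bool.and_true, hr j]
          congr 1
          simp only [decide_eq_decide]
          omega

theorem pow2_of_shape (n : Nat) (h0 : 0 < n) (h : n &&& (n - 1) = 0) : ∃ i, n = 2 ^ i := by
  obtain ⟨t, hl, -, -⟩ := lowbit_spec n h0
  exact ⟨t, by simpa [h] using hl⟩

theorem two_pow_shape (t : Nat) : (2 ^ t) &&& (2 ^ t - 1) = 0 := by
  rw [Nat.two_pow_and, Nat.testBit_two_pow_sub_one]
  simp

-- ---- contribution of one number to the counter at key k ----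

def contrib (m k : Int) : Int :=
  if 0 < k ∧ k.toNat &&& (k.toNat - 1) = 0 ∧ m.toNat &&& k.toNat ≠ 0 then 1 else 0

theorem contrib_nonneg (m k : Int) : 0 ≤ contrib m k := by
  unfold contrib; split <;> omega

-- ---- the masked number's bits vs A's bit test ----

-- bit i (i < 24) of num & 0xFFFFFF is exactly A's test num & (1 << i) != 0
theorem masked_testBit_lt (num : Int) (i : Nat) (hi : i < 24) :
    (PySem.Int.band num 16777215).toNat.testBit i
      = decide (PySem.Int.band num ((2 ^ i : Nat) : Int) ≠ 0) := by
  have hC : (16777215 : Int) = ((2 ^ 24 - 1 : Nat) : Int) := by norm_num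
  have hp : 0 < 2 ^ i := pow_pos (by norm_num) i
  have htn : ((2 : Int) ^ i).toNat = 2 ^ i := by
    rw [show ((2 : Int) ^ i) = ((2 ^ i : Nat) : Int) by push_cast; ring, Int.toNat_natCast]
  have h24 : ∀ j, Nat.testBit 16777215 j = decide (j < 24) := fun j => by
    rw [show (16777215 : Nat) = 2 ^ 24 - 1 from rfl, Nat.testBit_two_pow_sub_one]
  by_cases hnn : 0 ≤ num
  · rw [hC, PySem.Int.band_of_nonneg hnn (by positivity),
        PySem.Int.band_of_nonneg hnn (by positivity)]
    rcases h : num.toNat.testBit i <;>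
      simp [h, hi, Nat.testBit_and, Nat.and_two_pow, hp,
        Nat.pos_iff_ne_zero, Int.toNat_natCast, htn, h24]
  · rw [hC]
    have hb1 : PySem.Int.band num ((2 ^ 24 - 1 : Nat) : Int)
        = ((2 ^ 24 - 1 - ((2 ^ 24 - 1) &&& ((-num).toNat - 1)) : Nat) : Int) := by
      simp only [PySem.Int.band, hnn, if_false, Int.toNat_natCast]
      norm_num
    have hb2 : PySem.Int.band num ((2 ^ i : Nat) : Int)
        = ((2 ^ i - (2 ^ i &&& ((-num).toNat - 1)) : Nat) : Int) := by
      simp only [PySem.Int.band, hnn, if_false, Int.toNat_natCast]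
      norm_num [hp]
    rw [hb1, hb2]
    rcases h : ((-num).toNat - 1).testBit i <;>
      simp [h, hi, testBit_sub_and, Nat.two_pow_and, hp,
        Int.toNat_natCast, htn, h24]

theorem masked_testBit_ge (num : Int) (i : Nat) (hi : 24 ≤ i) :
    (PySem.Int.band num 16777215).toNat.testBit i = false := by
  have hC : (16777215 : Int) = ((2 ^ 24 - 1 : Nat) : Int) := by norm_num
  have h24 : ∀ j, Nat.testBit 16777215 j = decide (j < 24) := fun j => by
    rw [show (16777215 : Nat) = 2 ^ 24 - 1 from rfl, Nat.testBit_two_pow_sub_one]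
  by_cases hnn : 0 ≤ num
  · rw [hC, PySem.Int.band_of_nonneg hnn (by positivity)]
    simp [Nat.testBit_and, h24, Int.toNat_natCast,
      show ¬ i < 24 by omega]
  · rw [hC]
    have hb1 : PySem.Int.band num ((2 ^ 24 - 1 : Nat) : Int)
        = ((2 ^ 24 - 1 - ((2 ^ 24 - 1) &&& ((-num).toNat - 1)) : Nat) : Int) := by
      simp only [PySem.Int.band, hnn, if_false, Int.toNat_natCast]
      norm_num
    rw [hb1]
    simp [testBit_sub_and, h24, Int.toNat_natCast,
      show ¬ i < 24 by omega]

theorem masked_nonneg (num : Int) : 0 ≤ PySem.Int.band num 16777215 := by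
  rw [PySem.Int.band_comm]
  exact PySem.Int.band_nonneg_of_nonneg_left num (by omega)

-- ---- characterising kernLoop ----

theorem getD_kernLoop_aux : ∀ (N : Nat) (m : Int), m.toNat = N → 0 ≤ m →
    ∀ (d : PySem.Dict Int Int) (k : Int),
    (kernLoop m d).getD k 0 = d.getD k 0 + contrib m k := by
  intro N
  induction N using Nat.strong_induction_on with
  | _ N ih =>
    intro m hN hm d k
    rw [kernLoop]
    by_cases h0 : m ≤ 0
    · have hm0 : m = 0 := le_antisymm h0 hm
      subst hm0
      simp [contrib]
    · simp only [dif_neg h0]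
      set n := m.toNat with hn
      have hnpos : 0 < n := by omega
      have hm1 : (m - 1).toNat = n - 1 := by omega
      have hrest : PySem.Int.band m (m - 1) = ((n &&& (n - 1) : Nat) : Int) := by
        rw [PySem.Int.band_of_nonneg (by omega) (by omega), hm1]
      obtain ⟨t, hl, hb, hr⟩ := lowbit_spec n hnpos
      have hlow : PySem.Int.bxor m (PySem.Int.band m (m - 1)) = ((2 ^ t : Nat) : Int) := by
        rw [hrest, PySem.Int.bxor_of_nonneg hm (by positivity), Int.toNat_natCast, hl]
      have hrtoNat : (PySem.Int.band m (m - 1)).toNat = n &&& (n - 1) := by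
        rw [hrest, Int.toNat_natCast]
      have hrec := ih (n &&& (n - 1)) (by
          calc n &&& (n - 1) ≤ n - 1 := Nat.and_le_right
            _ < N := by omega)
        (PySem.Int.band m (m - 1)) hrtoNat (by rw [hrest]; positivity)
      rw [hrec, hlow]
      rw [PySem.Dict.getD_insert]
      by_cases hk : k = ((2 ^ t : Nat) : Int)
      · subst hk
        rw [if_pos rfl]
        have hc1 : contrib m ((2 ^ t : Nat) : Int) = 1 := by
          unfold contrib
          rw [if_pos]
          refine ⟨by positivity, ?_, ?_⟩
          · rw [Int.toNat_natCast]; exact two_pow_shape t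
          · rw [Int.toNat_natCast, ← hn, Nat.and_two_pow, hb]
            simp [Nat.pos_iff_ne_zero]
        have hc2 : contrib (PySem.Int.band m (m - 1)) ((2 ^ t : Nat) : Int) = 0 := by
          unfold contrib
          rw [if_neg]
          rintro ⟨-, -, hne⟩
          apply hne
          rw [hrtoNat, Int.toNat_natCast, Nat.and_two_pow, hr t]
          simp
        rw [hc1, hc2]
        ring
      · rw [if_neg hk]
        have : contrib (PySem.Int.band m (m - 1)) k = contrib m k := by
          unfold contrib
          by_cases hshape : 0 < k ∧ k.toNat &&& (k.toNat - 1) = 0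
          · obtain ⟨j, hj⟩ := pow2_of_shape k.toNat (by omega) hshape.2
            have hkj : k = ((2 ^ j : Nat) : Int) := by
              rw [← hj, Int.toNat_of_nonneg (by omega)]
            have hjt : j ≠ t := by
              intro he; exact hk (by rw [hkj, he])
            have heq : (n &&& (n - 1)) &&& k.toNat = n &&& k.toNat := by
              rw [hkj, Int.toNat_natCast, Nat.and_two_pow, Nat.and_two_pow, hr j]
              simp [hjt]
            rw [hrtoNat, heq, ← hn]
          · rw [if_neg (by tauto), if_neg (by tauto)]
        rw [this]

theorem getD_kernLoop (m : Int) (hm : 0 ≤ m) (d : PySem.Dict Int Int) (k : Int) :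
    (kernLoop m d).getD k 0 = d.getD k 0 + contrib m k :=
  getD_kernLoop_aux m.toNat m rfl hm d k

theorem nodup_keys_kernLoop : ∀ (N : Nat) (m : Int), m.toNat = N →
    ∀ (d : PySem.Dict Int Int), d.keys.Nodup → (kernLoop m d).keys.Nodup := by
  intro N
  induction N using Nat.strong_induction_on with
  | _ N ih =>
    intro m hN d hd
    rw [kernLoop]
    by_cases h0 : m ≤ 0
    · simpa [dif_pos h0] using hd
    · simp only [dif_neg h0]
      have hrest : (PySem.Int.band m (m - 1)).toNat < N := by
        rw [PySem.Int.band_of_nonneg (by omega) (by omega), Int.toNat_natCast]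
        calc m.toNat &&& (m - 1).toNat ≤ (m - 1).toNat := Nat.and_le_right
          _ < N := by omega
      exact ih _ hrest _ rfl _ (PySem.Dict.nodup_keys_insert _ _ _ hd)

-- ---- the fold over candidates ----

def cntK (cs : List Int) (k : Int) : Int :=
  (cs.map (fun num => contrib (PySem.Int.band num 16777215) k)).sum

def theCounter (cs : List Int) : PySem.Dict Int Int :=
  cs.foldl (fun counter num => kernLoop (PySem.Int.band num 16777215) counter) PySem.Dict.empty

theorem getD_fold_aux : ∀ (cs : List Int) (d : PySem.Dict Int Int) (k : Int),
    (cs.foldl (fun counter num => kernLoop (PySem.Int.band num 16777215) counter) d).getD k 0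
      = d.getD k 0 + cntK cs k := by
  intro cs
  induction cs with
  | nil => simp [cntK]
  | cons x t ihx =>
    intro d k
    simp only [List.foldl_cons]
    rw [ihx, getD_kernLoop _ (masked_nonneg x)]
    simp [cntK]
    ring

theorem getD_theCounter (cs : List Int) (k : Int) :
    (theCounter cs).getD k 0 = cntK cs k := by
  unfold theCounter
  rw [getD_fold_aux, PySem.Dict.getD_empty]
  ring

theorem nodup_keys_theCounter (cs : List Int) : (theCounter cs).keys.Nodup := by
  unfold theCounter
  induction cs using List.reverseRecOn with
  | nil => exact PySem.Dict.nodup_keys_empty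
  | append_singleton t x iht =>
    rw [List.foldl_append, List.foldl_cons, List.foldl_nil]
    exact nodup_keys_kernLoop _ _ rfl _ iht

theorem cntK_nonneg (cs : List Int) (k : Int) : 0 ≤ cntK cs k := by
  unfold cntK
  induction cs with
  | nil => simp
  | cons x t ih =>
    simp only [List.map_cons, List.sum_cons]
    have := contrib_nonneg (PySem.Int.band x 16777215) k
    omega

-- ---- A's per-bit count ----

def cntBit (cs : List Int) (i : Nat) (c0 : Int) : Int :=
  cs.foldl (fun count num =>
    if PySem.Int.band num (1 <<< i) ≠ 0 then count + 1 else count) c0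

theorem largestCombination_eq (cs : List Int) :
    largestCombination cs
      = (List.range 24).foldl (fun m j => max m (cntBit cs j 0)) 0 := by
  unfold largestCombination
  rw [PySem.List.pyRange_one, List.foldl_map]
  simp [cntBit]

theorem contrib_eq_ite (num : Int) (i : Nat) (hi : i < 24) :
    contrib (PySem.Int.band num 16777215) ((2 ^ i : Nat) : Int)
      = if PySem.Int.band num ((1 <<< i : Nat) : Int) ≠ 0 then 1 else 0 := by
  have hc : ((1 <<< i : Nat) : Int) = ((2 ^ i : Nat) : Int) := by rw [Nat.one_shiftLeft]
  simp only [hc]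
  unfold contrib
  have hp : 0 < 2 ^ i := pow_pos (by norm_num) i
  have hsh : ((2 ^ i : Nat) : Int).toNat = 2 ^ i := Int.toNat_natCast _
  by_cases hb : PySem.Int.band num ((2 ^ i : Nat) : Int) ≠ 0
  · rw [if_pos, if_pos hb]
    refine ⟨by positivity, by rw [hsh]; exact two_pow_shape i, ?_⟩
    rw [hsh, Nat.and_two_pow, masked_testBit_lt num i hi]
    simp [hp]
    push_cast at hb
    simpa using hb
  · rw [if_neg, if_neg hb]
    rintro ⟨-, -, hne⟩
    apply hne
    rw [hsh, Nat.and_two_pow, masked_testBit_lt num i hi]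
    push_cast at hb
    simpa using hb

theorem cntK_eq_cntBit (cs : List Int) (i : Nat) (hi : i < 24) :
    cntK cs ((2 ^ i : Nat) : Int) = cntBit cs i 0 := by
  unfold cntK cntBit
  have hstep : (fun count num =>
      if PySem.Int.band num ((1 <<< i : Nat) : Int) ≠ 0 then count + 1 else count)
      = (fun acc num => acc + contrib (PySem.Int.band num 16777215) ((2 ^ i : Nat) : Int)) := by
    funext count num
    rw [contrib_eq_ite num i hi]
    split <;> ring
  rw [hstep, PySem.List.foldl_add]
  ring

theorem cntK_ge24 (cs : List Int) (i : Nat) (hi : 24 ≤ i) :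
    cntK cs ((2 ^ i : Nat) : Int) = 0 := by
  unfold cntK
  induction cs with
  | nil => simp
  | cons x t ih =>
    simp only [List.map_cons, List.sum_cons, ih]
    have : contrib (PySem.Int.band x 16777215) ((2 ^ i : Nat) : Int) = 0 := by
      unfold contrib
      rw [if_neg]
      rintro ⟨-, -, hne⟩
      apply hne
      rw [Int.toNat_natCast, Nat.and_two_pow, masked_testBit_ge x i hi]
      simp
    rw [this]
    ring

theorem cntK_not_shape (cs : List Int) (k : Int)
    (h : ¬ (0 < k ∧ k.toNat &&& (k.toNat - 1) = 0)) : cntK cs k = 0 := by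
  unfold cntK
  induction cs with
  | nil => simp
  | cons x t ih =>
    simp only [List.map_cons, List.sum_cons, ih]
    rw [show contrib (PySem.Int.band x 16777215) k = 0 by unfold contrib; rw [if_neg (by tauto)]]
    ring

theorem foldl_max_le_int {β : Type} (xs : List β) (f : β → Int) (init c : Int)
    (h0 : init ≤ c) (h : ∀ x ∈ xs, f x ≤ c) :
    xs.foldl (fun acc y => max acc (f y)) init ≤ c := by
  induction xs generalizing init with
  | nil => exact h0
  | cons x t ih =>
    exact ih _ (by simp [h0, h x (by simp)]) (fun y hy => h y (by simp [hy]))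

-- every value of the final counter is cntK cs k for some key k
theorem values_theCounter (cs : List Int) (v : Int) (hv : v ∈ (theCounter cs).values) :
    ∃ k, v = cntK cs k := by
  rw [PySem.Dict.values_eq_map_keys _ (nodup_keys_theCounter cs) 0] at hv
  obtain ⟨k, -, rfl⟩ := List.mem_map.1 hv
  exact ⟨k, getD_theCounter cs k⟩

-- every cntK value is bounded by A's running max
theorem cntK_le_A (cs : List Int) (k : Int) :
    cntK cs k ≤ (List.range 24).foldl (fun m j => max m (cntBit cs j 0)) 0 := by
  have hA0 : (0 : Int) ≤ (List.range 24).foldl (fun m j => max m (cntBit cs j 0)) 0 :=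
    (PySem.List.le_foldl_max_int (List.range 24) (fun j => cntBit cs j 0) 0).1
  by_cases hshape : 0 < k ∧ k.toNat &&& (k.toNat - 1) = 0
  · obtain ⟨i, hi⟩ := pow2_of_shape k.toNat (by omega) hshape.2
    have hk : k = ((2 ^ i : Nat) : Int) := by
      rw [← hi, Int.toNat_of_nonneg (by omega)]
    subst hk
    by_cases hlt : i < 24
    · rw [cntK_eq_cntBit cs i hlt]
      exact (PySem.List.le_foldl_max_int (List.range 24) (fun j => cntBit cs j 0) 0).2 i
        (List.mem_range.2 hlt)
    · rw [cntK_ge24 cs i (by omega)]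
      exact hA0
  · rw [cntK_not_shape cs k hshape]
    exact hA0

-- ===== VERDICT (by name: the statement is the Claim_ definition above) =====
theorem largestCombination_spec : Claim_equal_largestCombination := by
  intro cs _
  unfold Spec_largestCombination largestCombination_alt
  rw [largestCombination_eq]
  show (List.range 24).foldl (fun m j => max m (cntBit cs j 0)) 0
    = PySem.List.maxD (theCounter cs).values (fun v => v) 0
  set A := (List.range 24).foldl (fun m j => max m (cntBit cs j 0)) 0 with hA
  rcases hval : (theCounter cs).values with _ | ⟨x, t⟩
  · -- no key was ever inserted: every cntK is 0, so A = 0 too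
    rw [PySem.List.maxD_nil]
    refine le_antisymm ?_ ((PySem.List.le_foldl_max_int _ _ _).1)
    apply foldl_max_le_int _ _ _ _ le_rfl
    intro i hi
    rw [← cntK_eq_cntBit cs i (List.mem_range.1 hi)]
    rcases lt_or_eq_of_le (cntK_nonneg cs ((2 ^ i : Nat) : Int)) with hlt | heq
    · exfalso
      -- a positive count means the key is present, so values would be nonempty
      have hne : (theCounter cs).getD ((2 ^ i : Nat) : Int) 0 ≠ 0 := by
        rw [getD_theCounter]; omega
      have hmem : ((2 ^ i : Nat) : Int) ∈ (theCounter cs).keys := by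
        by_contra hnot
        rw [PySem.Dict.getD, (PySem.Dict.get?_eq_none_iff_not_mem_keys _ _).2 hnot] at hne
        exact hne rfl
      have : (theCounter cs).getD ((2 ^ i : Nat) : Int) 0 ∈ (theCounter cs).values := by
        rw [PySem.Dict.values_eq_map_keys _ (nodup_keys_theCounter cs) 0]
        exact List.mem_map.2 ⟨_, hmem, rfl⟩
      rw [hval] at this
      simp at this
    · rw [← heq]
  · rw [PySem.List.maxD_id_cons]
    set B := t.foldl max x with hB
    have hmemvals : ∀ v ∈ (theCounter cs).values, v ≤ B := by
      intro v hv
      rw [hval] at hv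
      rcases List.mem_cons.1 hv with rfl | hvt
      · exact (PySem.List.le_foldl_max t v).1
      · exact (PySem.List.le_foldl_max t x).2 v hvt
    have hB0 : (0 : Int) ≤ B := by
      have hx : x ∈ (theCounter cs).values := by rw [hval]; simp
      obtain ⟨k, rfl⟩ := values_theCounter cs x hx
      exact le_trans (cntK_nonneg cs k) (PySem.List.le_foldl_max t _).1
    apply le_antisymm
    · -- A ≤ B : every per-bit count occurs among the values (or is 0)
      apply foldl_max_le_int _ _ _ _ hB0
      intro i hi
      rw [← cntK_eq_cntBit cs i (List.mem_range.1 hi)]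
      rcases lt_or_eq_of_le (cntK_nonneg cs ((2 ^ i : Nat) : Int)) with hlt | heq
      · have hne : (theCounter cs).getD ((2 ^ i : Nat) : Int) 0 ≠ 0 := by
          rw [getD_theCounter]; omega
        have hmem : ((2 ^ i : Nat) : Int) ∈ (theCounter cs).keys := by
          by_contra hnot
          rw [PySem.Dict.getD, (PySem.Dict.get?_eq_none_iff_not_mem_keys _ _).2 hnot] at hne
          exact hne rfl
        have hvm : cntK cs ((2 ^ i : Nat) : Int) ∈ (theCounter cs).values := by
          rw [PySem.Dict.values_eq_map_keys _ (nodup_keys_theCounter cs) 0]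
          exact List.mem_map.2 ⟨_, hmem, getD_theCounter cs _⟩
        exact hmemvals _ hvm
      · rw [← heq]; exact hB0
    · -- B ≤ A : B is one of the values, each of which is a cntK
      have hBmem : B ∈ (theCounter cs).values := by
        rw [hval]
        rcases PySem.List.foldl_max_mem t x with h | h
        · rw [hB, h]; simp
        · exact List.mem_cons_of_mem _ (hB ▸ h)
      obtain ⟨k, hk⟩ := values_theCounter cs B hBmem
      rw [hk]
      exact cntK_le_A cs k
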